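-- pv_equiv track=rewrite | github.com/eliottcassidy2000/math | 04-computation/dihedral_hp_analysis.py | all_circulant_sets
-- ===== SOURCE A (Python) =====
-- def all_circulant_sets(p):
--     pairs = []
--     used = set()
--     for d in range(1, p):
--         if d not in used:
--             pairs.append((d, p-d))
--             used.add(d); used.add(p-d)
--     results = []
--     for mask in range(2**len(pairs)):
--         S = set()
--         for i, (a, b) in enumerate(pairs):
--             S.add(b if (mask>>i)&1 else a)
--         results.append(frozenset(S))
--     return results
-- ===== SOURCE B (Python) =====
-- def all_circulant_sets(p):
--     combos = [()]
--     for a, b in [(d, p - d) for d in range(1, p // 2 + 1)]: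
--         combos = [t + (x,) for x in (a, b) for t in combos]
--     results = []
--     for c in combos:
--         S = set()
--         for x in c:
--             S.add(x)
--         results.append(frozenset(S))
--     return results
-- ===== Notes on version B (the rewrite author's own statement) =====
-- stated objective: alternative
-- what changed: B builds the complementary pairs in closed form over the first half of the range instead of filtering the whole range through a used-set, and enumerates the choice sets by an iterative cartesian-product fold over the pair list instead of decoding the bits of an exponential counter mask.
import Mathlib
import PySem

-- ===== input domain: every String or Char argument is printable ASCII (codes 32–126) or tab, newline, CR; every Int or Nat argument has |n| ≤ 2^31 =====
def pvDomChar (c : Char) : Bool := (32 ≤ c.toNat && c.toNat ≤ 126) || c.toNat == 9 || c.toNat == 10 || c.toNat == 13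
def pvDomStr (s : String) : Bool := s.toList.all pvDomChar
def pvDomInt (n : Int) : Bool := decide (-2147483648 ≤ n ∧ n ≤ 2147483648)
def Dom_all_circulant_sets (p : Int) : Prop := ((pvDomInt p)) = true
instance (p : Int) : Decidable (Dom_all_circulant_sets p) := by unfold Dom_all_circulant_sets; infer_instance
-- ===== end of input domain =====

-- B replaces the used-set pair loop by the closed-form range 1..p//2 and the 2^n bitmask
-- loop by a recursive cartesian-product enumeration (alternative decomposition, same cost).

-- ===== PORT A =====
-- loop body of: for d in range(1, p): if d not in used: pairs.append((d, p-d)); used.add(d); used.add(p-d)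
def acsPairStep (p : Int) (st : List (Int × Int) × PySem.Set Int) (d : Int) :
    List (Int × Int) × PySem.Set Int :=
  if st.2.contains d then st
  else (st.1 ++ [(d, p - d)], (st.2.add d).add (p - d))

-- Python's `b if (mask>>i)&1 else a` for iab = (i, (a, b))
def acsChoose (mask : Int) (iab : Int × (Int × Int)) : Int :=
  if PySem.Int.band (mask >>> iab.1.toNat) 1 ≠ 0 then iab.2.2 else iab.2.1

def all_circulant_sets (p : Int) : List (List Int) :=
  let pairs := ((PySem.List.pyRange 1 p 1).foldl (acsPairStep p) ([], PySem.Set.empty)).1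
  -- for mask in range(2**len(pairs)): S = set(); for i,(a,b) in enumerate(pairs): S.add(…); results.append(frozenset(S))
  (PySem.List.pyRange 0 ((2 : Int) ^ pairs.length) 1).foldl
    (fun results mask =>
      results ++ [(PySem.List.enumerate pairs 0).foldl
        (fun (S : PySem.Set Int) iab => S.add (acsChoose mask iab)) PySem.Set.empty])
    []

-- ===== PORT B =====
def all_circulant_sets_alt (p : Int) : List (List Int) :=
  -- combos = [()]; for a, b in pairs: combos = [t + (x,) for x in (a, b) for t in combos]
  let combos := ((PySem.List.pyRange 1 (PySem.Int.floordiv p 2 + 1) 1).map (fun d => (d, p - d))).foldl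
    (fun (combos : List (List Int)) ab =>
      [ab.1, ab.2].flatMap (fun x => combos.map (fun t => t ++ [x])))
    [[]]
  -- results = []; for c in combos: S = set(); for x in c: S.add(x); results.append(frozenset(S))
  combos.foldl (fun results c => results ++ [c.foldl PySem.Set.add PySem.Set.empty]) []

-- ===== PRECONDITION & SPEC =====
def Spec_all_circulant_sets (p : Int) (out : List (List Int)) : Prop := out = all_circulant_sets_alt p
instance (p : Int) (out : List (List Int)) : Decidable (Spec_all_circulant_sets p out) := by unfold Spec_all_circulant_sets; infer_instance

-- ===== CLAIM (what is proved, stated in full; the proofs are below) =====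
def Claim_equal_all_circulant_sets : Prop := ∀ (p : Int), Dom_all_circulant_sets p → Spec_all_circulant_sets p (all_circulant_sets p)

-- ===== LEMMAS AND PROOFS =====

-- proof-side recursive form of B's cartesian-product fold: first pair varies fastest
def acsEnum : List (Int × Int) → List (List Int)
  | [] => [[]]
  | (a, b) :: rest => (acsEnum rest).flatMap (fun t => [a :: t, b :: t])

-- proof-side recursive form of A's inner choice loop: bit 0 picks the first pair, then halve
def acsG : Int → List (Int × Int) → List Int
  | _, [] => []
  | m, (a, b) :: r => (if PySem.Int.band m 1 ≠ 0 then b else a) :: acsG (m / 2) r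

lemma acsChoose_eq (mask : Int) (iab : Int × (Int × Int)) :
    acsChoose mask iab
    = if PySem.Int.band (mask / ((2 ^ iab.1.toNat : Nat) : Int)) 1 ≠ 0 then iab.2.2 else iab.2.1 := by
  unfold acsChoose
  rw [Int.shiftRight_eq_div_pow]

lemma acs_div_div (m : Int) (s : Nat) :
    (m / ((2 ^ s : Nat) : Int)) / 2 = m / ((2 ^ (s + 1) : Nat) : Int) := by
  push_cast
  rw [Int.ediv_ediv_of_nonneg (by positivity), ← pow_succ]

lemma acs_choices (mask : Int) :
    ∀ (r : List (Int × Int)) (s : Nat),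
    (PySem.List.enumerate r (s : Int)).map (fun iab => acsChoose mask iab)
    = acsG (mask / ((2 ^ s : Nat) : Int)) r := by
  intro r
  induction r with
  | nil => intro s; simp [PySem.List.enumerate_nil, acsG]
  | cons x r ih =>
    intro s
    obtain ⟨a, b⟩ := x
    have hs : ((s : Int) + 1) = ((s + 1 : Nat) : Int) := by push_cast; ring
    rw [PySem.List.enumerate_cons, List.map_cons, hs, ih (s + 1), acsChoose_eq, acsG,
        acs_div_div]
    norm_num

lemma acs_buildS (pairs : List (Int × Int)) (mask : Int) :
    (PySem.List.enumerate pairs 0).foldl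
      (fun (S : PySem.Set Int) iab => S.add (acsChoose mask iab)) PySem.Set.empty
    = PySem.Set.ofList (acsG mask pairs) := by
  rw [← PySem.Set.update_map_eq_foldl_add]
  have h0 : (PySem.Set.empty : PySem.Set Int) = [] := rfl
  have h1 : ((0 : Int)) = ((0 : Nat) : Int) := rfl
  rw [h0, PySem.Set.update_nil_left, h1, acs_choices mask pairs 0]
  norm_num

lemma acs_foldl_append {α β : Type} (f : β → α) :
    ∀ (l : List β) (acc : List α),
      l.foldl (fun res m => res ++ [f m]) acc = acc ++ l.map f
  | [], acc => by simp
  | x :: l, acc => by simp [acs_foldl_append f l]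

lemma acs_range_double {α : Type} (F : Int → α) (K : Nat) :
    (PySem.List.pyRange 0 (2 * (K : Int)) 1).map F
    = (PySem.List.pyRange 0 (K : Int) 1).flatMap (fun q => [F (2 * q), F (2 * q + 1)]) := by
  induction K with
  | zero => simp [PySem.List.pyRange_one_eq_nil]
  | succ n ih =>
    have h1 : (2 * ((n + 1 : Nat) : Int)) = (2 * (n : Int) + 1) + 1 := by push_cast; ring
    have h2 : ((n + 1 : Nat) : Int) = (n : Int) + 1 := by push_cast; ring
    rw [h1, PySem.List.pyRange_one_succ_right (by omega),
        show (2 * (n : Int) + 1) = (2 * (n : Int)) + 1 from rfl,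
        PySem.List.pyRange_one_succ_right (by omega),
        h2, PySem.List.pyRange_one_succ_right (by omega)]
    simp [ih]

lemma acs_bit_even (q : Int) : PySem.Int.band (2 * q) 1 = 0 := by
  rw [PySem.Int.band_one, PySem.Int.mod_eq_emod_of_pos (by omega)]; omega

lemma acs_bit_odd (q : Int) : PySem.Int.band (2 * q + 1) 1 = 1 := by
  rw [PySem.Int.band_one, PySem.Int.mod_eq_emod_of_pos (by omega)]; omega

lemma acs_half_odd (q : Int) : (2 * q + 1) / 2 = q := by omega

lemma acs_core : ∀ (r : List (Int × Int)),
    (PySem.List.pyRange 0 ((2 : Int) ^ r.length) 1).map (fun m => acsG m r) = acsEnum r := by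
  intro r
  induction r with
  | nil =>
    rw [show ((2 : Int) ^ ([] : List (Int × Int)).length) = 0 + 1 from rfl,
        PySem.List.pyRange_one_singleton]
    simp [acsG, acsEnum]
  | cons x r ih =>
    obtain ⟨a, b⟩ := x
    have hlen : (2 : Int) ^ (((a, b) :: r).length) = 2 * (((2 ^ r.length : Nat) : Int)) := by
      push_cast; rw [List.length_cons]; ring
    have hc : ((2 ^ r.length : Nat) : Int) = (2 : Int) ^ r.length := by push_cast; ring
    rw [hlen, acs_range_double]
    have hfun : (fun q : Int => [acsG (2 * q) ((a, b) :: r), acsG (2 * q + 1) ((a, b) :: r)])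
        = (fun q : Int => [a :: acsG q r, b :: acsG q r]) := by
      funext q
      simp [acsG, acs_bit_even, acs_bit_odd, acs_half_odd]
    rw [hfun, hc, show acsEnum ((a, b) :: r) = (acsEnum r).flatMap (fun t => [a :: t, b :: t]) from rfl,
        ← ih, List.flatMap_map]

lemma acs_results (pairs : List (Int × Int)) :
    (PySem.List.pyRange 0 ((2 : Int) ^ pairs.length) 1).foldl
      (fun results mask =>
        results ++ [(PySem.List.enumerate pairs 0).foldl
          (fun (S : PySem.Set Int) iab => S.add (acsChoose mask iab)) PySem.Set.empty])
      []
    = (acsEnum pairs).map (fun c => PySem.Set.ofList c) := by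
  rw [acs_foldl_append (fun mask => (PySem.List.enumerate pairs 0).foldl
        (fun (S : PySem.Set Int) iab => S.add (acsChoose mask iab)) PySem.Set.empty)]
  simp only [acs_buildS, List.nil_append]
  rw [← acs_core, List.map_map]
  rfl

lemma acs_pairs (p : Int) : ∀ (n : Nat), (n : Int) ≤ p - 1 →
    ∃ used : PySem.Set Int,
      (PySem.List.pyRange 1 (1 + (n : Int)) 1).foldl (acsPairStep p) ([], PySem.Set.empty)
      = ((PySem.List.pyRange 1 (min (n : Int) (p / 2) + 1) 1).map (fun d => (d, p - d)), used)
      ∧ ∀ x : Int, x ∈ used ↔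
          (1 ≤ x ∧ x ≤ min (n : Int) (p / 2)) ∨ (p - min (n : Int) (p / 2) ≤ x ∧ x ≤ p - 1) := by
  intro n
  induction n with
  | zero =>
    intro hn
    have hmin : min ((0 : Nat) : Int) (p / 2) = 0 := by omega
    refine ⟨[], ?_, ?_⟩
    · rw [hmin, PySem.List.pyRange_one_eq_nil (by omega), PySem.List.pyRange_one_eq_nil (by omega)]
      rfl
    · intro x
      rw [hmin]
      simp
      omega
  | succ n ih =>
    intro hn
    obtain ⟨used, heq, hmem⟩ := ih (by omega)
    have hc : (1 : Int) + ((n + 1 : Nat) : Int) = (1 + (n : Int)) + 1 := by push_cast; ring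
    rw [hc, PySem.List.pyRange_one_succ_right (by omega), List.foldl_append, heq, List.foldl_cons,
        List.foldl_nil, show (1 : Int) + (n : Int) = (n : Int) + 1 from by ring]
    by_cases hcase : 2 * ((n : Int) + 1) ≤ p
    · -- d = n+1 is fresh: it is appended and both d and p-d are marked used
      have hmin : min ((n : Int)) (p / 2) = (n : Int) := by omega
      have hcont : used.contains ((n : Int) + 1) = false := by
        rw [Bool.eq_false_iff]
        intro hc2
        rw [PySem.Set.contains_iff, hmem] at hc2
        omega
      unfold acsPairStep
      rw [hcont]
      simp only [Bool.false_eq_true, if_false]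
      refine ⟨(used.add ((n : Int) + 1)).add (p - ((n : Int) + 1)), ?_, ?_⟩
      · have hmin' : min (((n + 1 : Nat)) : Int) (p / 2) = (n : Int) + 1 := by push_cast; omega
        rw [hmin', hmin]
        conv_rhs => rw [PySem.List.pyRange_one_succ_right (show (1 : Int) ≤ (n : Int) + 1 by omega)]
        rw [List.map_append]
        rfl
      · intro x
        have hmin' : min (((n + 1 : Nat)) : Int) (p / 2) = (n : Int) + 1 := by push_cast; omega
        rw [hmin']
        simp only [PySem.Set.mem_add, hmem, hmin]
        omega
    · -- d = n+1 was already marked used (it is p - d' for an earlier d'): state unchanged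
      have hmin : min ((n : Int)) (p / 2) = p / 2 := by omega
      have hcont : used.contains ((n : Int) + 1) = true := by
        rw [PySem.Set.contains_iff, hmem, hmin]
        right
        omega
      have hmin' : min (((n + 1 : Nat)) : Int) (p / 2) = p / 2 := by push_cast; omega
      unfold acsPairStep
      rw [hcont]
      simp only [if_true]
      exact ⟨used, by rw [hmin', hmin], fun x => by rw [hmin', hmem, hmin]⟩

lemma acs_fold_enum :
    ∀ (r : List (Int × Int)) (acc : List (List Int)),
      r.foldl (fun (combos : List (List Int)) ab =>
          [ab.1, ab.2].flatMap (fun x => combos.map (fun t => t ++ [x]))) acc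
      = (acsEnum r).flatMap (fun t => acc.map (fun c => c ++ t))
  | [], acc => by simp [acsEnum]
  | (a, b) :: r, acc => by
    rw [List.foldl_cons, acs_fold_enum r, show acsEnum ((a, b) :: r)
          = (acsEnum r).flatMap (fun t => [a :: t, b :: t]) from rfl,
        List.flatMap_assoc]
    refine List.flatMap_congr (fun t _ => ?_)
    simp [List.map_map, Function.comp_def, List.append_assoc]

lemma acs_alt_eq (p : Int) :
    all_circulant_sets_alt p
    = (acsEnum ((PySem.List.pyRange 1 (PySem.Int.floordiv p 2 + 1) 1).map (fun d => (d, p - d)))).map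
        (fun c => PySem.Set.ofList c) := by
  unfold all_circulant_sets_alt
  rw [acs_foldl_append (fun c => List.foldl PySem.Set.add PySem.Set.empty c), acs_fold_enum]
  simp [PySem.Set.ofList_eq_foldl, PySem.Set.empty]

-- ===== VERDICT (by name: the statement is the Claim_ definition above) =====
theorem all_circulant_sets_spec : Claim_equal_all_circulant_sets := by
  intro p _
  unfold Spec_all_circulant_sets
  rw [acs_alt_eq, PySem.Int.floordiv_eq_ediv_of_pos (by omega : (0 : Int) < 2)]
  unfold all_circulant_sets
  by_cases hp : p ≤ 1
  · rw [PySem.List.pyRange_one_eq_nil hp, PySem.List.pyRange_one_eq_nil (show p / 2 + 1 ≤ 1 by omega)]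
    simp only [List.foldl_nil, List.map_nil, List.length_nil, pow_zero]
    rw [show PySem.List.pyRange 0 1 1 = [0] from by decide]
    simp [acsEnum, PySem.List.enumerate_nil]
  · obtain ⟨used, heq, _⟩ := acs_pairs p (p - 1).toNat (by omega)
    have hc1 : (1 : Int) + (((p - 1).toNat : Int)) = p := by omega
    have hc2 : min (((p - 1).toNat : Int)) (p / 2) = p / 2 := by omega
    rw [hc1, hc2] at heq
    simp only [heq]
    exact acs_results _
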